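-- pv_equiv track=rewrite | github.com/neilstudd/advent-of-code | 2024/day15/day15.py | index_of_first_empty_row
-- ===== SOURCE A (Python) =====
-- def index_of_first_empty_row(data):
--     # Create a dictionary to group values by y
--     y_groups = {}
--
--     for x, y, val in data:
--         if y not in y_groups:
--             y_groups[y] = []
--         y_groups[y].append(val)
--
--     # Check each group to find the first one that contains only '.'
--     for y, vals in y_groups.items():
--         if all(val == '.' for val in vals):
--             return y
--
--     return -1  # Return None if no such group is found
-- ===== SOURCE B (Python) =====
-- def index_of_first_empty_row(data):
--     # One pass to collect the "dirty" rows (rows containing a non-'.' value),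
--     # then one scan of data returning the first y that is not dirty.
--     dirty = {y for _, y, val in data if val != '.'}
--     for _, y, _ in data:
--         if y not in dirty:
--             return y
--     return -1
-- ===== Notes on version B (the rewrite author's own statement) =====
-- stated objective: simpler
-- what changed: Replaces the dict grouping y -> list of values plus a per-group all('.') scan by a set of 'dirty' rows built in one comprehension and a single scan of data returning the first y not in that set; no value lists are materialized.
import Mathlib
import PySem

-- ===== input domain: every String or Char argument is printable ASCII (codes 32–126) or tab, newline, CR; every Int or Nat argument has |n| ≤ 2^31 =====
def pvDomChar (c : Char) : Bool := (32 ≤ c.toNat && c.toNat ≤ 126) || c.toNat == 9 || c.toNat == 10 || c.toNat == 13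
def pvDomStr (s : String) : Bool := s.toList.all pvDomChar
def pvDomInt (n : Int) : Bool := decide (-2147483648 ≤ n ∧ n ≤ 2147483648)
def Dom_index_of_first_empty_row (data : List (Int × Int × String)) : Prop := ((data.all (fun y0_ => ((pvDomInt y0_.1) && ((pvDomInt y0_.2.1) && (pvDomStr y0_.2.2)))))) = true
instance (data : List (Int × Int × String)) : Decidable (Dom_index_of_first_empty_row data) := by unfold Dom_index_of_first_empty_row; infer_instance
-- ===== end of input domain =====

-- B replaces A's dict of per-row value lists (plus a per-group all('.') scan) by a set of
-- "dirty" rows and a single scan of data; objective: simpler.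

-- ===== PORT A =====
-- the 'for y, vals in y_groups.items(): if all(...): return y' loop of A
def pvGoA : List (Int × List String) → Int
  | [] => -1
  | (y, vs) :: rest => if vs.all (fun v => v == ".") then y else pvGoA rest

def index_of_first_empty_row (data : List (Int × Int × String)) : Int :=
  -- 'if y not in y_groups: y_groups[y] = []; y_groups[y].append(val)' is the grouping
  -- idiom d[y] = d.get(y, []) + [val], ported with Dict.modify
  let y_groups : PySem.Dict Int (List String) :=
    data.foldl (fun d t => d.modify t.2.1 [] (fun vs => vs ++ [t.2.2])) PySem.Dict.empty
  pvGoA y_groups.items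

-- ===== PORT B =====
-- the 'for _, y, _ in data: if y not in dirty: return y' loop of B
def pvGoB (dirty : PySem.Set Int) : List (Int × Int × String) → Int
  | [] => -1
  | t :: rest => if PySem.Set.contains dirty t.2.1 then pvGoB dirty rest else t.2.1

def index_of_first_empty_row_alt (data : List (Int × Int × String)) : Int :=
  let dirty : PySem.Set Int :=
    PySem.Set.ofList ((data.filter (fun t => t.2.2 != ".")).map (fun t => t.2.1))
  pvGoB dirty data

-- ===== PRECONDITION & SPEC =====
def Spec_index_of_first_empty_row (data : List (Int × Int × String)) (out : Int) : Prop := out = index_of_first_empty_row_alt data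
instance (data : List (Int × Int × String)) (out : Int) : Decidable (Spec_index_of_first_empty_row data out) := by unfold Spec_index_of_first_empty_row; infer_instance

-- ===== CLAIM (what is proved, stated in full; the proofs are below) =====
def Claim_equal_index_of_first_empty_row : Prop := ∀ (data : List (Int × Int × String)), Dom_index_of_first_empty_row data → Spec_index_of_first_empty_row data (index_of_first_empty_row data)

-- ===== LEMMAS AND PROOFS =====

-- first-match-or-(-1), the common shape of both loops
def pvFindD (q : Int → Bool) (l : List Int) : Int := (l.find? q).getD (-1)

-- B's loop is pvFindD of 'not dirty' over the y's of data
theorem pvGoB_eq_findD (s : PySem.Set Int) (l : List (Int × Int × String)) :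
    pvGoB s l = pvFindD (fun y => !PySem.Set.contains s y) (l.map (fun t => t.2.1)) := by
  induction l with
  | nil => rfl
  | cons t rest ih =>
      simp only [pvGoB, pvFindD, List.map_cons, List.find?_cons]
      cases h : PySem.Set.contains s t.2.1 <;> simp [ih, pvFindD]

-- A's loop over (y, g y) pairs is pvFindD of 'g y is all dots'
theorem pvGoA_eq_findD (g : Int → List String) (l : List Int) :
    pvGoA (l.map (fun y => (y, g y))) =
      pvFindD (fun y => (g y).all (fun v => v == ".")) l := by
  induction l with
  | nil => rfl
  | cons y rest ih =>
      simp only [pvGoA, pvFindD, List.map_cons, List.find?_cons]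
      cases h : (g y).all (fun v => v == ".") <;> simp [ih, pvFindD]

-- items of a dict with nodup keys, as a map over its keys
theorem items_eq_keys_map (d : PySem.Dict Int (List String)) (h : d.keys.Nodup) :
    d.items = d.keys.map (fun k => (k, d.getD k [])) := by
  have : d.keys.map (fun k => (k, d.getD k [])) = d.items.map (fun p => (p.1, d.getD p.1 [])) := by
    simp only [PySem.Dict.keys, List.map_map]; rfl
  rw [this]
  have : d.items.map (fun p => (p.1, d.getD p.1 [])) = d.items.map id := by
    apply List.map_congr_left
    intro p hp
    have := PySem.Dict.getD_of_mem_items (k := p.1) (v := p.2) (d := d) (d0 := ([] : List String))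
    simp [this hp h]
  simp [this]

-- find? is preserved when a some-yielding prefix grows by Set.add's
theorem find?_foldl_add_of_some (q : Int → Bool) (ys : List Int) :
    ∀ (s : List Int) (r : Int), s.find? q = some r → (ys.foldl PySem.Set.add s).find? q = some r := by
  induction ys with
  | nil => intro s r h; simpa using h
  | cons y rest ih =>
      intro s r h
      simp only [List.foldl_cons]
      apply ih
      unfold PySem.Set.add
      split
      · exact h
      · rw [List.find?_append, h]; rfl

-- find? over a Set.add fold equals find? over the added list, when the seed has no match
theorem find?_foldl_add (q : Int → Bool) (ys : List Int) :
    ∀ (s : List Int), s.find? q = none → (ys.foldl PySem.Set.add s).find? q = ys.find? q := by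
  induction ys with
  | nil => intro s h; simpa using h
  | cons y rest ih =>
      intro s h
      simp only [List.foldl_cons, List.find?_cons]
      cases hq : q y with
      | true =>
          apply find?_foldl_add_of_some
          have hys : y ∉ s := by
            intro hmem
            have := List.find?_eq_none.mp h y hmem
            simp [hq] at this
          unfold PySem.Set.add
          rw [if_neg (by simpa [PySem.Set.contains] using hys)]
          rw [List.find?_append, h]
          simp [hq]
      | false =>
          apply ih
          unfold PySem.Set.add
          split
          · exact h
          · rw [List.find?_append, h]; simp [hq]

-- deduplicating (Set.ofList) does not change the first match
theorem findD_ofList (q : Int → Bool) (ys : List Int) :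
    pvFindD q (PySem.Set.ofList ys) = pvFindD q ys := by
  unfold pvFindD
  rw [PySem.Set.ofList_eq_foldl, find?_foldl_add q ys [] rfl]

-- the two row predicates agree: a row is all dots iff it is not in the dirty set
theorem pred_eq (data : List (Int × Int × String)) (y : Int) :
    (((data.map (fun t => (t.2.1, t.2.2))).filter (fun p => p.1 == y)).map (fun p => p.2)).all
        (fun v => v == ".")
      = !PySem.Set.contains
          (PySem.Set.ofList ((data.filter (fun t => t.2.2 != ".")).map (fun t => t.2.1))) y := by
  by_cases hy : y ∈ (data.filter (fun t => t.2.2 != ".")).map (fun t => t.2.1)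
  · rw [(PySem.Set.contains_iff _ _).mpr ((PySem.Set.mem_ofList _ _).mpr hy)]
    obtain ⟨t, ht, hty⟩ := List.mem_map.mp hy
    obtain ⟨htd, hv⟩ := List.mem_filter.mp ht
    have hne : t.2.2 ≠ "." := by simpa using hv
    simp only [Bool.not_true, List.all_eq_false]
    refine ⟨t.2.2, ?_, by simpa using hne⟩
    exact List.mem_map.mpr ⟨(t.2.1, t.2.2),
      List.mem_filter.mpr ⟨List.mem_map.mpr ⟨t, htd, rfl⟩, by simpa using hty⟩, rfl⟩
  · have hc : PySem.Set.contains
        (PySem.Set.ofList ((data.filter (fun t => t.2.2 != ".")).map (fun t => t.2.1))) y = false := by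
      rw [Bool.eq_false_iff]
      intro h
      exact hy ((PySem.Set.mem_ofList _ _).mp ((PySem.Set.contains_iff _ _).mp h))
    rw [hc]
    simp only [Bool.not_false, List.all_eq_true]
    intro v hv
    obtain ⟨p, hp, rfl⟩ := List.mem_map.mp hv
    obtain ⟨hpm, hpy⟩ := List.mem_filter.mp hp
    obtain ⟨t, htd, rfl⟩ := List.mem_map.mp hpm
    by_contra hne0
    have hne : t.2.2 ≠ "." := by intro h; exact hne0 (by simp [h])
    exact hy (List.mem_map.mpr ⟨t, List.mem_filter.mpr ⟨htd, by simpa using hne⟩, by simpa using hpy⟩)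

-- A's whole computation, over an arbitrary (y, val) pair list
theorem A_side (pairs : List (Int × String)) :
    pvGoA ((pairs.foldl (fun d p => d.modify p.1 [] (fun vs => vs ++ [p.2]))
        PySem.Dict.empty).items)
      = pvFindD
          (fun y => ((pairs.filter (fun p => p.1 == y)).map (fun p => p.2)).all (fun v => v == "."))
          (PySem.Set.ofList (pairs.map (fun p => p.1))) := by
  set d := pairs.foldl (fun d p => d.modify p.1 [] (fun vs => vs ++ [p.2])) PySem.Dict.empty with hd
  have hkeys : d.keys = PySem.Set.ofList (pairs.map (fun p => p.1)) := by
    rw [hd, PySem.Dict.keys_foldl_modify_key]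
    simp [PySem.Set.update, PySem.Set.ofList_eq_foldl]
  have hnodup : d.keys.Nodup := by rw [hkeys]; exact PySem.Set.nodup_ofList _
  have hgetD : ∀ y, d.getD y [] = (pairs.filter (fun p => p.1 == y)).map (fun p => p.2) := by
    intro y
    rw [hd, PySem.Dict.getD_foldl_modify_append]
    simp
  rw [items_eq_keys_map d hnodup]
  have hmap : d.keys.map (fun k => (k, d.getD k []))
      = d.keys.map (fun k => (k, (pairs.filter (fun p => p.1 == k)).map (fun p => p.2))) := by
    apply List.map_congr_left; intro k _; rw [hgetD]
  rw [hmap, pvGoA_eq_findD, hkeys]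

-- ===== VERDICT (by name: the statement is the Claim_ definition above) =====
theorem index_of_first_empty_row_spec : Claim_equal_index_of_first_empty_row := by
  intro data _
  unfold Spec_index_of_first_empty_row index_of_first_empty_row index_of_first_empty_row_alt
  show pvGoA ((data.foldl (fun d t => d.modify t.2.1 [] (fun vs => vs ++ [t.2.2]))
        PySem.Dict.empty).items)
      = pvGoB (PySem.Set.ofList ((data.filter (fun t => t.2.2 != ".")).map (fun t => t.2.1))) data
  have hfold :
      data.foldl (fun d t => d.modify t.2.1 [] (fun vs => vs ++ [t.2.2])) PySem.Dict.empty
        = (data.map (fun t => (t.2.1, t.2.2))).foldl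
            (fun d p => d.modify p.1 [] (fun vs => vs ++ [p.2])) PySem.Dict.empty := by
    rw [List.foldl_map]
  rw [hfold, A_side, findD_ofList, pvGoB_eq_findD]
  have hyy : (data.map (fun t => (t.2.1, t.2.2))).map (fun p => p.1) = data.map (fun t => t.2.1) := by
    simp
  rw [hyy]
  congr 1
  funext y
  rw [pred_eq]
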